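-- pv_equiv track=rewrite | github.com/Hettbhutak/Task-Allocation-with-Audio-files | src/dependency_resolver.py | _find_matching_task
-- ===== SOURCE A (Python) =====
-- from typing import Dict, List, Optional, Set, Tuple
--
-- def _find_matching_task(
--
--     phrase: str,
--     task_descriptions: List[str],
--     exclude_idx: int
-- ) -> Optional[int]:
--     """
--     Finds a task that matches the dependency phrase.
--
--     Args:
--         phrase: The dependency phrase to match
--         task_descriptions: List of task descriptions (lowercase)
--         exclude_idx: Index to exclude (the dependent task itself)
--
--     Returns:
--         Index of matching task or None
--     """
--     phrase_lower = phrase.lower().strip()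
--
--     # Try to find a task that contains key words from the phrase
--     phrase_words = set(phrase_lower.split())
--
--     # Remove common filler words
--     filler_words = {'the', 'a', 'an', 'is', 'are', 'being', 'completed', 'done', 'finished', 'first'}
--     phrase_words = phrase_words - filler_words
--
--     best_match_idx = None
--     best_match_score = 0
--
--     for i, desc in enumerate(task_descriptions):
--         if i == exclude_idx:
--             continue
--
--         # Check for phrase containment
--         if phrase_lower in desc or desc in phrase_lower:
--             return i
--
--         # Check for key term matches (login, bug, database, etc.)
--         desc_words = set(desc.split()) - filler_words
--
--         # Check for partial word matches (e.g., "login" matches "login bug")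
--         for phrase_word in phrase_words:
--             for desc_word in desc_words:
--                 if phrase_word in desc_word or desc_word in phrase_word:
--                     # Strong match on key terms
--                     if phrase_word in ['login', 'bug', 'database', 'api', 'test', 'payment', 'onboarding']:
--                         return i
--
--         # Check for word overlap
--         overlap = len(phrase_words & desc_words)
--
--         if overlap > best_match_score and overlap >= 1:
--             best_match_score = overlap
--             best_match_idx = i
--
--     return best_match_idx
-- ===== SOURCE B (Python) =====
-- def _find_matching_task(phrase, task_descriptions, exclude_idx):
--     phrase_lower = phrase.lower().strip()
--     filler = {'the', 'a', 'an', 'is', 'are', 'being', 'completed', 'done', 'finished', 'first'}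
--     key_terms = {'login', 'bug', 'database', 'api', 'test', 'payment', 'onboarding'}
--     phrase_words = set(phrase_lower.split()) - filler
--     candidates = [(i, d) for i, d in enumerate(task_descriptions) if i != exclude_idx]
--
--     def strong(desc):
--         if phrase_lower in desc or desc in phrase_lower:
--             return True
--         desc_words = set(desc.split()) - filler
--         return any(p in q or q in p
--                    for p in phrase_words & key_terms for q in desc_words)
--
--     # pass 1: the first strong match (containment or key-term hit) wins
--     for i, desc in candidates:
--         if strong(desc):
--             return i
--
--     # pass 2: the first index attaining the maximum word overlap, if positive
--     overlaps = [(i, len(phrase_words & (set(d.split()) - filler)))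
--                 for i, d in candidates]
--     top = max((ov for _, ov in overlaps), default=0)
--     if top < 1:
--         return None
--     return next(i for i, ov in overlaps if ov == top)
-- ===== Notes on version B (the rewrite author's own statement) =====
-- stated objective: simpler
-- what changed: A's single fused loop (early return interleaved with a strict-improvement best tracker) is split into two sequential passes: pass 1 returns the first strong match (containment or key-term substring hit, with the key-term guard folded into pw & key_terms), and pass 2 returns the first index attaining the maximum word overlap when that maximum is at least 1.
import Mathlib
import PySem

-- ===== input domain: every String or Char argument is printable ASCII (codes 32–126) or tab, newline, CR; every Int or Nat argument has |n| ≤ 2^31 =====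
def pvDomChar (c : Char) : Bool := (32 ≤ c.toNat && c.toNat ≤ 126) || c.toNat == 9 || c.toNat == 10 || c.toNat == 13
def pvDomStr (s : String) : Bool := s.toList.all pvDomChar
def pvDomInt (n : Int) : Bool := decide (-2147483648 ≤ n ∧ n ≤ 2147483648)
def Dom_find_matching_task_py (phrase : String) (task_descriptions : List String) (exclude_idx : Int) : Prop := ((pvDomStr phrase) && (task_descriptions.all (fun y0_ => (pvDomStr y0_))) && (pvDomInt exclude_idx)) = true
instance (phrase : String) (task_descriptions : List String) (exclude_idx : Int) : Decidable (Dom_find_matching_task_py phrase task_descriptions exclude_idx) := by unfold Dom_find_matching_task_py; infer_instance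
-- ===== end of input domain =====

-- B replaces A's single fused scan (early return + running best tracker) by two sequential passes:
-- first strong match, else first index attaining the maximum word overlap; objective: simpler decomposition.


-- shared literal constants of both Pythons
def pvFillerWords : PySem.Set String :=
  PySem.Set.ofList ["the", "a", "an", "is", "are", "being", "completed", "done", "finished", "first"]
def pvKeyTerms : List String := ["login", "bug", "database", "api", "test", "payment", "onboarding"]
-- set(desc.split()) - filler_words, as both Pythons compute it
def pvDescWords (d : String) : PySem.Set String :=
  PySem.Set.diff (PySem.Set.ofList (PySem.Str.split₀ d)) pvFillerWords

-- ===== PORT A =====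
-- the nested partial-word loop with the key-term guard (exists p, q with substring hit and p a key term)
def pvA_keyHit (pw dw : PySem.Set String) : Bool :=
  pw.any (fun p => dw.any (fun q =>
    (PySem.Str.isIn p q || PySem.Str.isIn q p) && decide (p ∈ pvKeyTerms)))

-- A's fused for-loop: early return on containment / key hit, else strict-improvement best tracking
def pvA_loop (pl : String) (pw : PySem.Set String) (ex : Int) :
    List (Int × String) → Option Int → Int → Option Int
  | [], best, _ => best
  | (i, desc) :: rest, best, score =>
    if i = ex then pvA_loop pl pw ex rest best score
    else if PySem.Str.isIn pl desc || PySem.Str.isIn desc pl then some i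
    else
      let dw := pvDescWords desc
      if pvA_keyHit pw dw then some i
      else
        let ov : Int := PySem.Set.len (PySem.Set.inter pw dw)
        if score < ov ∧ 1 ≤ ov then pvA_loop pl pw ex rest (some i) ov
        else pvA_loop pl pw ex rest best score

def find_matching_task_py (phrase : String) (task_descriptions : List String) (exclude_idx : Int) : Option Int :=
  let pl := PySem.Str.strip (PySem.Str.lower phrase)
  let pw := PySem.Set.diff (PySem.Set.ofList (PySem.Str.split₀ pl)) pvFillerWords
  pvA_loop pl pw exclude_idx (PySem.List.enumerate task_descriptions 0) none 0

-- ===== PORT B =====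
-- B's strong test: containment, or a substring hit between a key phrase word and a desc word
def pvB_strong (pl : String) (pw : PySem.Set String) (desc : String) : Bool :=
  (PySem.Str.isIn pl desc || PySem.Str.isIn desc pl) ||
  (PySem.Set.inter pw (PySem.Set.ofList pvKeyTerms)).any (fun p =>
    (pvDescWords desc).any (fun q => PySem.Str.isIn p q || PySem.Str.isIn q p))

def find_matching_task_py_alt (phrase : String) (task_descriptions : List String) (exclude_idx : Int) : Option Int :=
  let pl := PySem.Str.strip (PySem.Str.lower phrase)
  let pw := PySem.Set.diff (PySem.Set.ofList (PySem.Str.split₀ pl)) pvFillerWords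
  let cands := (PySem.List.enumerate task_descriptions 0).filter (fun p => !decide (p.1 = exclude_idx))
  -- pass 1: first strong match wins
  match cands.find? (fun p => pvB_strong pl pw p.2) with
  | some p => some p.1
  | none =>
    -- pass 2: first index attaining the maximum overlap, if positive
    let overlaps := cands.map (fun p => (p.1, PySem.Set.len (PySem.Set.inter pw (pvDescWords p.2))))
    let top : Int := PySem.List.maxD (overlaps.map (·.2)) (fun x => x) 0
    if top < 1 then none
    else (overlaps.find? (fun p => p.2 == top)).map (·.1)

-- ===== PRECONDITION & SPEC =====
def Spec_find_matching_task_py (phrase : String) (task_descriptions : List String) (exclude_idx : Int) (out : Option Int) : Prop := out = find_matching_task_py_alt phrase task_descriptions exclude_idx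
instance (phrase : String) (task_descriptions : List String) (exclude_idx : Int) (out : Option Int) : Decidable (Spec_find_matching_task_py phrase task_descriptions exclude_idx out) := by unfold Spec_find_matching_task_py; infer_instance

-- ===== CLAIM (what is proved, stated in full; the proofs are below) =====
def Claim_equal_find_matching_task_py : Prop := ∀ (phrase : String) (task_descriptions : List String) (exclude_idx : Int), Dom_find_matching_task_py phrase task_descriptions exclude_idx → Spec_find_matching_task_py phrase task_descriptions exclude_idx (find_matching_task_py phrase task_descriptions exclude_idx)

-- ===== LEMMAS AND PROOFS =====

-- B's key-term pass over pw ∩ key_terms equals A's nested loop with the key-term guard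
lemma pvKeyHit_eq (pw dw : PySem.Set String) :
    ((PySem.Set.inter pw (PySem.Set.ofList pvKeyTerms)).any (fun p =>
      dw.any (fun q => PySem.Str.isIn p q || PySem.Str.isIn q p))) = pvA_keyHit pw dw := by
  rw [Bool.eq_iff_iff]
  unfold pvA_keyHit
  simp only [List.any_eq_true, Bool.and_eq_true, Bool.or_eq_true, decide_eq_true_eq]
  constructor
  · rintro ⟨p, hp, q, hq, h⟩
    rw [PySem.Set.mem_inter, PySem.Set.mem_ofList] at hp
    exact ⟨p, hp.1, q, hq, h, hp.2⟩
  · rintro ⟨p, hp, q, hq, h, hk⟩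
    exact ⟨p, (PySem.Set.mem_inter _ _ _).2 ⟨hp, (PySem.Set.mem_ofList _ _).2 hk⟩, q, hq, h⟩

-- A's fused inner tests equal B's strong test
lemma pvB_strong_eq (pl : String) (pw : PySem.Set String) (d : String) :
    pvB_strong pl pw d =
      ((PySem.Str.isIn pl d || PySem.Str.isIn d pl) || pvA_keyHit pw (pvDescWords d)) := by
  unfold pvB_strong
  rw [pvKeyHit_eq]

lemma pvOv_nonneg (pw : PySem.Set String) (d : String) :
    0 ≤ PySem.Set.len (PySem.Set.inter pw (pvDescWords d)) := by
  simp [PySem.Set.len]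

-- the cons step of A's loop, with the lets expanded
lemma pvA_loop_cons (pl : String) (pw : PySem.Set String) (ex i : Int) (desc : String)
    (tl : List (Int × String)) (b : Option Int) (s : Int) :
    pvA_loop pl pw ex ((i, desc) :: tl) b s =
      if i = ex then pvA_loop pl pw ex tl b s
      else if PySem.Str.isIn pl desc || PySem.Str.isIn desc pl then some i
      else if pvA_keyHit pw (pvDescWords desc) then some i
      else if s < PySem.Set.len (PySem.Set.inter pw (pvDescWords desc)) ∧
              1 ≤ PySem.Set.len (PySem.Set.inter pw (pvDescWords desc)) then
        pvA_loop pl pw ex tl (some i) (PySem.Set.len (PySem.Set.inter pw (pvDescWords desc)))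
      else pvA_loop pl pw ex tl b s := rfl

-- A's fused loop = (first strong match) orElse (first index attaining the running maximum, if it beats s)
lemma pvA_loop_eq (pl : String) (pw : PySem.Set String) (ex : Int)
    (l : List (Int × String)) (b : Option Int) (s : Int) (hs : 0 ≤ s) :
    pvA_loop pl pw ex l b s =
      (match (l.filter (fun p => !decide (p.1 = ex))).find? (fun p => pvB_strong pl pw p.2) with
       | some p => some p.1
       | none =>
         let ol := (l.filter (fun p => !decide (p.1 = ex))).map
           (fun p => (p.1, PySem.Set.len (PySem.Set.inter pw (pvDescWords p.2))))
         let M := (ol.map (·.2)).foldl max s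
         if s < M then (ol.find? (fun p => p.2 == M)).map (·.1) else b) := by
  induction l generalizing b s with
  | nil => simp [pvA_loop]
  | cons hd tl ih =>
    obtain ⟨i, desc⟩ := hd
    by_cases hex : i = ex
    · have hfil : ((i, desc) :: tl).filter (fun p => !decide (p.1 = ex)) =
          tl.filter (fun p => !decide (p.1 = ex)) := by simp [hex]
      rw [pvA_loop_cons, if_pos hex, hfil]
      exact ih b s hs
    · have hfil : ((i, desc) :: tl).filter (fun p => !decide (p.1 = ex)) =
          (i, desc) :: tl.filter (fun p => !decide (p.1 = ex)) := by simp [hex]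
      rw [pvA_loop_cons, if_neg hex, hfil]
      by_cases hc : (PySem.Str.isIn pl desc || PySem.Str.isIn desc pl) = true
      · have hstrong : pvB_strong pl pw desc = true := by
          rw [pvB_strong_eq, hc]; rfl
        rw [if_pos hc]
        simp only [List.find?_cons, hstrong]
      · rw [Bool.not_eq_true] at hc
        by_cases hk : pvA_keyHit pw (pvDescWords desc) = true
        · have hstrong : pvB_strong pl pw desc = true := by
            rw [pvB_strong_eq, hc, hk]; rfl
          rw [if_neg (by rw [hc]; simp), if_pos hk]
          simp only [List.find?_cons, hstrong]
        · rw [Bool.not_eq_true] at hk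
          have hstrong : pvB_strong pl pw desc = false := by
            rw [pvB_strong_eq, hc, hk]; rfl
          rw [if_neg (by rw [hc]; simp), if_neg (by rw [hk]; simp)]
          simp only [List.find?_cons, hstrong, List.map_cons, List.foldl_cons]
          have hov0 : 0 ≤ PySem.Set.len (PySem.Set.inter pw (pvDescWords desc)) :=
            pvOv_nonneg pw desc
          generalize PySem.Set.len (PySem.Set.inter pw (pvDescWords desc)) = ov at hov0 ⊢
          by_cases hcase : s < ov
          · have hmax : max s ov = ov := by omega
            rw [if_pos ⟨hcase, by omega⟩, hmax, ih (some i) ov hov0]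
            cases hfind : (tl.filter (fun p => !decide (p.1 = ex))).find? (fun p => pvB_strong pl pw p.2) with
            | some p => rfl
            | none =>
              simp only []
              set tl' := ((tl.filter (fun p => !decide (p.1 = ex))).map
                (fun p => (p.1, PySem.Set.len (PySem.Set.inter pw (pvDescWords p.2))))).map
                (fun x => x.2) with htl'
              have hovM : ov ≤ tl'.foldl max ov := (PySem.List.le_foldl_max tl' ov).1
              rw [if_pos (lt_of_lt_of_le hcase hovM)]
              by_cases hlt : ov < tl'.foldl max ov
              · have hne : (ov == tl'.foldl max ov) = false :=
                  beq_eq_false_iff_ne.mpr (by omega)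
                rw [if_pos hlt]
                simp only [hne]
              · have hMov : tl'.foldl max ov = ov := by omega
                have heq : (ov == tl'.foldl max ov) = true := beq_iff_eq.mpr hMov.symm
                rw [if_neg hlt]
                simp only [heq]
                rfl
          · have hmax : max s ov = s := by omega
            rw [if_neg (by omega), hmax, ih b s hs]
            cases hfind : (tl.filter (fun p => !decide (p.1 = ex))).find? (fun p => pvB_strong pl pw p.2) with
            | some p => rfl
            | none =>
              simp only []
              set tl' := ((tl.filter (fun p => !decide (p.1 = ex))).map
                (fun p => (p.1, PySem.Set.len (PySem.Set.inter pw (pvDescWords p.2))))).map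
                (fun x => x.2) with htl'
              by_cases hsM : s < tl'.foldl max s
              · have hne : (ov == tl'.foldl max s) = false :=
                  beq_eq_false_iff_ne.mpr (by omega)
                rw [if_pos hsM, if_pos hsM]
                simp only [hne]
              · rw [if_neg hsM, if_neg hsM]

-- maxD over a list of nonnegative ints, default 0, is the running max from 0
lemma pvMaxD_eq_foldl (xs : List Int) (hnn : ∀ x ∈ xs, 0 ≤ x) :
    PySem.List.maxD xs (fun x => x) 0 = xs.foldl max 0 := by
  cases xs with
  | nil => rfl
  | cons x t =>
    have hx : 0 ≤ x := hnn x (by simp)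
    have hm : max 0 x = x := by omega
    rw [PySem.List.maxD, PySem.List.max?_id_cons, Option.getD_some, List.foldl_cons, hm]

-- ===== VERDICT (by name: the statement is the Claim_ definition above) =====
theorem find_matching_task_py_spec : Claim_equal_find_matching_task_py := by
  intro phrase task_descriptions exclude_idx _
  unfold Spec_find_matching_task_py
  simp only [find_matching_task_py, find_matching_task_py_alt]
  rw [pvA_loop_eq _ _ _ _ _ _ le_rfl]
  cases hfind : ((PySem.List.enumerate task_descriptions 0).filter
      (fun p => !decide (p.1 = exclude_idx))).find? (fun p =>
        pvB_strong (PySem.Str.strip (PySem.Str.lower phrase))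
          (PySem.Set.diff (PySem.Set.ofList (PySem.Str.split₀ (PySem.Str.strip (PySem.Str.lower phrase)))) pvFillerWords) p.2) with
  | some p => rfl
  | none =>
    simp only []
    rw [pvMaxD_eq_foldl]
    · set ol := ((PySem.List.enumerate task_descriptions 0).filter
        (fun p => !decide (p.1 = exclude_idx))).map
        (fun p => (p.1, PySem.Set.len (PySem.Set.inter
          (PySem.Set.diff (PySem.Set.ofList (PySem.Str.split₀ (PySem.Str.strip (PySem.Str.lower phrase)))) pvFillerWords)
          (pvDescWords p.2)))) with hol
      by_cases h0 : (0 : Int) < (ol.map (·.2)).foldl max 0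
      · rw [if_pos h0, if_neg (by omega)]
      · rw [if_neg h0, if_pos (by omega)]
    · intro x hx
      rcases List.mem_map.1 hx with ⟨q, hq, rfl⟩
      rcases List.mem_map.1 hq with ⟨r, hr, rfl⟩
      exact pvOv_nonneg _ _
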